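-- pv_equiv track=rewrite | github.com/jirogihub8/CODE-main | RC.py | forest_diff_no_get
-- ===== SOURCE A (Python) =====
-- def forest_diff_no_get(N, B, C):
--     # Bước 1: Ghép lại và sắp xếp theo chiều cao tăng
--     trees = sorted([(C[i], B[i]) for i in range(N)])
--
--     total_cnt = 0
--     total_sum = 0
--     cnt_type = {}
--     sum_type = {}
--     ans = 0
--
--     i = 0
--     while i < N:
--         j = i
--         same = []
--         # Gom nhóm các cây có cùng chiều cao
--         while j < N and trees[j][0] == trees[i][0]:
--             same.append(trees[j])
--             j += 1
--
--         # Bước 2: Tính chênh lệch cho nhóm này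
--         for c, b in same:
--             cnt_b = cnt_type[b] if b in cnt_type else 0
--             sum_b = sum_type[b] if b in sum_type else 0
--
--             ans += c * (total_cnt - cnt_b) - (total_sum - sum_b)
--
--         # Bước 3: Cập nhật sau khi xét nhóm
--         for c, b in same:
--             if b not in cnt_type:
--                 cnt_type[b] = 0
--                 sum_type[b] = 0
--             cnt_type[b] += 1
--             sum_type[b] += c
--             total_cnt += 1
--             total_sum += c
--
--         i = j
--
--     return ans
-- ===== SOURCE B (Python) =====
-- def forest_diff_no_get(N, B, C):
--     # all-pairs closed form minus same-type closed form (heights sorted ascending)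
--     def pair_sum(s):
--         n = len(s)
--         return sum(h * (2 * k - (n - 1)) for k, h in enumerate(s))
--
--     buckets = {}
--     for i in range(N):
--         buckets.setdefault(B[i], []).append(C[i])
--     total = pair_sum(sorted(C[i] for i in range(N)))
--     for hs in buckets.values():
--         total -= pair_sum(sorted(hs))
--     return total
-- ===== Notes on version B (the rewrite author's own statement) =====
-- stated objective: alternative
-- what changed: Instead of A's single sweep over the sorted (height,type) pairs with running per-type count/sum dictionaries, B computes the answer as the all-pairs sum minus the same-type-pairs sum, each obtained from the closed form sum(s[k]*(2k-(n-1))) over a sorted height list (one global list, one per type bucket).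
import Mathlib
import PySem

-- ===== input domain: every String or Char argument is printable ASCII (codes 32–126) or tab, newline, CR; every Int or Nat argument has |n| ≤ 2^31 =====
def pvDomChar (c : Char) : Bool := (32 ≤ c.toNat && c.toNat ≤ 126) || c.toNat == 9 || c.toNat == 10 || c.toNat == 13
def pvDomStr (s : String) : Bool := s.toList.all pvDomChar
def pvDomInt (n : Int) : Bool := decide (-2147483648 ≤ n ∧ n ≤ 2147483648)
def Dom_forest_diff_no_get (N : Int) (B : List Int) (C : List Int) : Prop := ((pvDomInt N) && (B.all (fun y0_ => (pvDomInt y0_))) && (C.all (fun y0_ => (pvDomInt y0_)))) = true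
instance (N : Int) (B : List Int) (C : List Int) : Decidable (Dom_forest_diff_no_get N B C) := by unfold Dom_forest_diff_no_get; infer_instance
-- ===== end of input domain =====

-- B replaces A's sweep over the sorted (height,type) pairs (running per-type count/sum dicts)
-- by "all-pairs sum minus same-type-pairs sum", each from the closed form Σ s[k]*(2k-(n-1))
-- on a sorted height list: a different decomposition of the same O(N log N) task.

-- ===== PORT A =====
-- A's first `for c, b in same:` loop (ans += c*(total_cnt-cnt_b) - (total_sum-sum_b))
def pvAnsLoop (same : List (Int × Int)) (tc ts : Int) (cnt sm : PySem.Dict Int Int)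
    (ans : Int) : Int :=
  same.foldl (fun a p => a + (p.1 * (tc - cnt.getD p.2 0) - (ts - sm.getD p.2 0))) ans

-- A's second `for c, b in same:` loop: state = (cnt_type, sum_type, total_cnt, total_sum)
def pvUpdLoop (same : List (Int × Int))
    (st : PySem.Dict Int Int × PySem.Dict Int Int × Int × Int) :
    PySem.Dict Int Int × PySem.Dict Int Int × Int × Int :=
  same.foldl
    (fun st p =>
      let cnt := st.1; let sm := st.2.1; let tc := st.2.2.1; let ts := st.2.2.2
      -- `if b not in cnt_type: cnt_type[b] = 0; sum_type[b] = 0`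
      let cnt := if cnt.contains p.2 then cnt else cnt.insert p.2 0
      let sm := if sm.contains p.2 then sm else sm.insert p.2 0
      (cnt.insert p.2 (cnt.getD p.2 0 + 1), sm.insert p.2 (sm.getD p.2 0 + p.1),
       tc + 1, ts + p.1))
    st

-- A's outer `while i < N` loop: each pass takes `same`, the run of equal heights starting at i
def pvSweepA : List (Int × Int) → PySem.Dict Int Int × PySem.Dict Int Int × Int × Int →
    Int → Int
  | [], _, ans => ans
  | t :: rest, st, ans =>
      let same := t :: rest.takeWhile (fun p => p.1 == t.1)
      let rest' := rest.dropWhile (fun p => p.1 == t.1)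
      pvSweepA rest' (pvUpdLoop same st) (pvAnsLoop same st.2.2.1 st.2.2.2 st.1 st.2.1 ans)
  termination_by l => l.length
  decreasing_by
    simpa using Nat.lt_succ_of_le (List.length_dropWhile_le _ _)

-- Python sorts the (height, type) tuples lexicographically; A's sweep only groups by the
-- height component, so the stable sort by height (no DecidableLT on Int × Int is available)
-- is output-exact here: the tie order inside an equal-height run is never observable.
def forest_diff_no_get (N : Int) (B : List Int) (C : List Int) : Int :=
  let trees := PySem.List.sorted
    ((PySem.List.pyRange 0 N 1).map
      (fun i => (PySem.List.pyGetD C i 0, PySem.List.pyGetD B i 0)))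
    (fun p => p.1) false
  pvSweepA trees (PySem.Dict.empty, PySem.Dict.empty, 0, 0) 0

-- ===== PORT B =====
-- Source B's pair_sum: sum(h * (2*k - (n-1)) for k, h in enumerate(s))
def pvPairSum (s : List Int) : Int :=
  ((PySem.List.enumerate s).map (fun kh => kh.2 * (2 * kh.1 - ((s.length : Int) - 1)))).sum

def forest_diff_no_get_alt (N : Int) (B : List Int) (C : List Int) : Int :=
  let idx := PySem.List.pyRange 0 N 1
  -- buckets.setdefault(B[i], []).append(C[i])  ==  buckets[B[i]] = buckets.get(B[i], []) + [C[i]]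
  let buckets := idx.foldl
    (fun d i => d.modify (PySem.List.pyGetD B i 0) [] (fun l => l ++ [PySem.List.pyGetD C i 0]))
    PySem.Dict.empty
  let total := pvPairSum
    (PySem.List.sorted (idx.map (fun i => PySem.List.pyGetD C i 0)) (fun h => h) false)
  buckets.values.foldl (fun t hs => t - pvPairSum (PySem.List.sorted hs (fun h => h) false)) total

-- ===== PRECONDITION & SPEC =====
-- Pre_ excludes exactly the inputs where Python A raises IndexError: N larger than a list length.
def Pre_forest_diff_no_get (N : Int) (B : List Int) (C : List Int) : Prop :=
  N ≤ (B.length : Int) ∧ N ≤ (C.length : Int)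
instance (N : Int) (B : List Int) (C : List Int) : Decidable (Pre_forest_diff_no_get N B C) := by
  unfold Pre_forest_diff_no_get; infer_instance
def pvWitness_forest_diff_no_get : Int × List Int × List Int := (3, [1, 2, 1], [5, 7, 2])

def Spec_forest_diff_no_get (N : Int) (B : List Int) (C : List Int) (out : Int) : Prop := out = forest_diff_no_get_alt N B C
instance (N : Int) (B : List Int) (C : List Int) (out : Int) : Decidable (Spec_forest_diff_no_get N B C out) := by unfold Spec_forest_diff_no_get; infer_instance

-- ===== CLAIM (what is proved, stated in full; the proofs are below) =====
def Claim_equal_forest_diff_no_get : Prop := ∀ (N : Int) (B : List Int) (C : List Int), Dom_forest_diff_no_get N B C → Pre_forest_diff_no_get N B C → Spec_forest_diff_no_get N B C (forest_diff_no_get N B C)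

-- ===== LEMMAS AND PROOFS =====

-- Sum of f over the unordered pairs of l (f applied with the earlier element first).
def pvPairFold {α : Type} (f : α → α → Int) : List α → Int
  | [] => 0
  | x :: t => (t.map (f x)).sum + pvPairFold f t

-- the instances used: all-pairs |Δheight|, different-type / same-type |Δheight| on (height, type)
def pvSall : List Int → Int := pvPairFold (fun x y => |x - y|)
def pvSdiff : List (Int × Int) → Int :=
  pvPairFold (fun x y => if x.2 = y.2 then 0 else |x.1 - y.1|)
def pvSsame : List (Int × Int) → Int :=
  pvPairFold (fun x y => if x.2 = y.2 then |x.1 - y.1| else 0)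
-- signed variant: what A's sweep accumulates on the height-sorted list
def pvGs (x y : Int × Int) : Int := if x.2 = y.2 then 0 else y.1 - x.1

theorem pvPairFold_perm {α : Type} (f : α → α → Int) (hsym : ∀ x y, f x y = f y x)
    {l l' : List α} (h : l.Perm l') : pvPairFold f l = pvPairFold f l' := by
  induction h with
  | nil => rfl
  | cons x h ih =>
      simp only [pvPairFold, ih, List.Perm.sum_eq (List.Perm.map _ h)]
  | swap x y t =>
      simp only [pvPairFold, List.map_cons, List.sum_cons, hsym x y]
      ring
  | trans h₁ h₂ ih₁ ih₂ => exact ih₁.trans ih₂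

theorem pvSall_split (l : List (Int × Int)) :
    pvSall (l.map (·.1)) = pvSdiff l + pvSsame l := by
  induction l with
  | nil => rfl
  | cons x t ih =>
      simp only [pvSall, pvSdiff, pvSsame, pvPairFold, List.map_cons, List.map_map,
        Function.comp_def] at *
      have hpt : ∀ y : Int × Int, |x.1 - y.1|
          = (if x.2 = y.2 then 0 else |x.1 - y.1|) + (if x.2 = y.2 then |x.1 - y.1| else 0) := by
        intro y; by_cases h : x.2 = y.2 <;> simp [h]
      rw [List.map_congr_left (fun (y : Int × Int) _ => hpt y), PySem.List.sum_map_add_int]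
      omega

-- enumerate with a shifted start
theorem pvEnumShift {α : Type} (xs : List α) (s : Int) :
    PySem.List.enumerate xs (s + 1) = (PySem.List.enumerate xs s).map (fun kh => (kh.1 + 1, kh.2)) := by
  induction xs generalizing s with
  | nil => rfl
  | cons x xs ih => simp [PySem.List.enumerate_cons, ih]

theorem pvSumSub (xs : List Int) (x : Int) :
    (xs.map (fun y => y - x)).sum = xs.sum - (xs.length : Int) * x := by
  induction xs with
  | nil => simp
  | cons z xs ih => simp only [List.map_cons, List.sum_cons, List.length_cons, ih]; push_cast; ring

theorem pvPairSum_eq_pvSall (s : List Int) (h : s.Pairwise (· ≤ ·)) :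
    pvPairSum s = pvSall s := by
  induction s with
  | nil => rfl
  | cons x xs ih =>
      rcases List.pairwise_cons.mp h with ⟨hx, ht⟩
      have hsplit : ((PySem.List.enumerate xs 0).map
            (fun kh => kh.2 * (2 * (kh.1 + 1) - (((x :: xs).length : Int) - 1)))).sum
          = pvPairSum xs + xs.sum := by
        have : ∀ kh : Int × Int, kh.2 * (2 * (kh.1 + 1) - (((x :: xs).length : Int) - 1))
            = kh.2 * (2 * kh.1 - ((xs.length : Int) - 1)) + kh.2 := by
          intro kh; simp only [List.length_cons]; push_cast; ring
        rw [List.map_congr_left (fun kh _ => this kh), PySem.List.sum_map_add_int]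
        simp only [pvPairSum]
        rw [PySem.List.map_snd_enumerate]
      have habs : (xs.map (fun y => |x - y|)) = xs.map (fun y => y - x) :=
        List.map_congr_left (fun y hy => by
          rw [abs_sub_comm]; exact abs_of_nonneg (by linarith [hx y hy]))
      simp only [pvPairSum, PySem.List.enumerate_cons, List.map_cons, List.sum_cons]
      rw [pvEnumShift, List.map_map]
      simp only [Function.comp_def]
      rw [hsplit, ih ht]
      simp only [pvSall, pvPairFold]
      rw [habs, pvSumSub]
      simp only [List.length_cons]
      push_cast
      ring

theorem pvSumOff (K : List Int) (f g : Int → Int) (a : Int) (hnd : K.Nodup) (ha : a ∈ K)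
    (hfg : ∀ b ∈ K, b ≠ a → f b = g b) :
    (K.map f).sum = (K.map g).sum + (f a - g a) := by
  induction K with
  | nil => cases ha
  | cons k K ih =>
      rcases List.nodup_cons.mp hnd with ⟨hk, hndK⟩
      simp only [List.map_cons, List.sum_cons]
      rcases List.mem_cons.mp ha with rfl | haK
      · have : K.map f = K.map g :=
          List.map_congr_left (fun b hb => hfg b (List.mem_cons_of_mem _ hb)
            (fun hba => hk (hba ▸ hb)))
        rw [this]; ring
      · have hfk : f k = g k := hfg k List.mem_cons_self (fun hka => hk (hka ▸ haK))
        rw [hfk, ih hndK haK (fun b hb hba => hfg b (List.mem_cons_of_mem _ hb) hba)]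
        ring

theorem pvSumIte (L : List (Int × Int)) (x : Int × Int) :
    (L.map (fun y => if x.2 = y.2 then |x.1 - y.1| else 0)).sum
      = ((L.filter (fun p => p.2 == x.2)).map (fun y => |x.1 - y.1|)).sum := by
  induction L with
  | nil => rfl
  | cons z L ih =>
      by_cases h : x.2 = z.2
      · have hf : List.filter (fun p => p.2 == x.2) (z :: L)
            = z :: List.filter (fun p => p.2 == x.2) L := by
          simp [h]
        rw [List.map_cons, List.sum_cons, if_pos h, hf, List.map_cons, List.sum_cons, ih]
      · have hb : (z.2 == x.2) = false := beq_eq_false_iff_ne.mpr (fun he => h he.symm)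
        have hf : List.filter (fun p => p.2 == x.2) (z :: L)
            = List.filter (fun p => p.2 == x.2) L := by
          simp [hb]
        rw [List.map_cons, List.sum_cons, if_neg h, hf, ih]
        ring

theorem pvSsame_partition (L : List (Int × Int)) (K : List Int) (hnd : K.Nodup)
    (hcov : ∀ p ∈ L, p.2 ∈ K) :
    pvSsame L = (K.map (fun b => pvSall ((L.filter (fun p => p.2 == b)).map (·.1)))).sum := by
  induction L with
  | nil =>
      have hz : (fun (b : Int) => pvSall
          ((List.filter (fun p => p.2 == b) ([] : List (Int × Int))).map (·.1)))
          = fun _ => (0 : Int) := rfl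
      rw [hz]
      have h0 : (K.map fun _ => (0 : Int)).sum = 0 := by simp
      rw [h0]
      rfl
  | cons x L ih =>
      have hx : x.2 ∈ K := hcov x List.mem_cons_self
      have hcov' : ∀ p ∈ L, p.2 ∈ K := fun p hp => hcov p (List.mem_cons_of_mem _ hp)
      have hfilter : ∀ b : Int, ((x :: L).filter (fun p => p.2 == b))
          = (if x.2 = b then [x] else []) ++ L.filter (fun p => p.2 == b) := by
        intro b
        by_cases hb : x.2 = b
        · simp [hb]
        · simp [hb]
      have hoff : ∀ b ∈ K, b ≠ x.2 →
          pvSall (((x :: L).filter (fun p => p.2 == b)).map (·.1))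
            = pvSall ((L.filter (fun p => p.2 == b)).map (·.1)) := by
        intro b _ hbne
        rw [hfilter b, if_neg (fun he => hbne he.symm)]
        simp
      rw [pvSumOff K _ _ x.2 hnd hx hoff]
      have hfx : pvSall (((x :: L).filter (fun p => p.2 == x.2)).map (·.1))
          = ((L.filter (fun p => p.2 == x.2)).map (fun y => |x.1 - y.1|)).sum
            + pvSall ((L.filter (fun p => p.2 == x.2)).map (·.1)) := by
        rw [hfilter x.2, if_pos rfl]
        simp only [List.cons_append, List.nil_append, List.map_cons, pvSall, pvPairFold,
          List.map_map, Function.comp_def]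
      rw [hfx]
      simp only [pvSsame, pvPairFold] at *
      rw [ih hcov', pvSumIte]
      ring

-- ---- A-side: the sweep computes pvSdiff of the sorted list ----
def pvCtr (p : List (Int × Int)) (b : Int) : Int := ((p.filter (fun x => x.2 == b)).length : Int)
def pvSumT (p : List (Int × Int)) (b : Int) : Int := ((p.filter (fun x => x.2 == b)).map (·.1)).sum
def pvTerm (p : List (Int × Int)) (y : Int × Int) : Int :=
  y.1 * ((p.length : Int) - pvCtr p y.2) - ((p.map (·.1)).sum - pvSumT p y.2)

def pvMatch (st : PySem.Dict Int Int × PySem.Dict Int Int × Int × Int)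
    (p : List (Int × Int)) : Prop :=
  st.2.2.1 = (p.length : Int) ∧ st.2.2.2 = (p.map (·.1)).sum ∧
  (∀ b, st.1.getD b 0 = pvCtr p b) ∧ (∀ b, st.2.1.getD b 0 = pvSumT p b)

def pvSpecSweep (p : List (Int × Int)) : List (Int × Int) → Int
  | [] => 0
  | y :: r => pvTerm p y + pvSpecSweep (p ++ [y]) r

theorem pvCtr_append (p : List (Int × Int)) (q : Int × Int) (b : Int) :
    pvCtr (p ++ [q]) b = pvCtr p b + (if b = q.2 then 1 else 0) := by
  by_cases h : b = q.2
  · simp [pvCtr, List.filter_append, h]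
  · have hb : (q.2 == b) = false := beq_eq_false_iff_ne.mpr (fun he => h he.symm)
    simp [pvCtr, List.filter_append, hb, h]

theorem pvSumT_append (p : List (Int × Int)) (q : Int × Int) (b : Int) :
    pvSumT (p ++ [q]) b = pvSumT p b + (if b = q.2 then q.1 else 0) := by
  by_cases h : b = q.2
  · simp [pvSumT, List.filter_append, h]
  · have hb : (q.2 == b) = false := beq_eq_false_iff_ne.mpr (fun he => h he.symm)
    simp [pvSumT, List.filter_append, hb, h]

theorem pvUpdLoop_match (same : List (Int × Int)) : ∀ st p, pvMatch st p →
    pvMatch (pvUpdLoop same st) (p ++ same) := by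
  induction same with
  | nil => intro st p h; simpa [pvUpdLoop] using h
  | cons q same ih =>
      intro st p h
      obtain ⟨h1, h2, h3, h4⟩ := h
      have hstep : pvMatch
          (let cnt := st.1; let sm := st.2.1; let tc := st.2.2.1; let ts := st.2.2.2
           let cnt := if cnt.contains q.2 then cnt else cnt.insert q.2 0
           let sm := if sm.contains q.2 then sm else sm.insert q.2 0
           (cnt.insert q.2 (cnt.getD q.2 0 + 1), sm.insert q.2 (sm.getD q.2 0 + q.1),
            tc + 1, ts + q.1)) (p ++ [q]) := by
        have hc : ∀ b, (if st.1.contains q.2 then st.1 else st.1.insert q.2 0).getD b 0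
            = st.1.getD b 0 := by
          intro b
          by_cases hcon : st.1.contains q.2
          · rw [if_pos hcon]
          · rw [if_neg hcon, PySem.Dict.getD_insert]
            by_cases hb : b = q.2
            · rw [if_pos hb, hb,
                PySem.Dict.getD_of_not_contains _ _ (by simpa using hcon)]
            · rw [if_neg hb]
        have hs : ∀ b, (if st.2.1.contains q.2 then st.2.1 else st.2.1.insert q.2 0).getD b 0
            = st.2.1.getD b 0 := by
          intro b
          by_cases hcon : st.2.1.contains q.2
          · rw [if_pos hcon]
          · rw [if_neg hcon, PySem.Dict.getD_insert]
            by_cases hb : b = q.2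
            · rw [if_pos hb, hb,
                PySem.Dict.getD_of_not_contains _ _ (by simpa using hcon)]
            · rw [if_neg hb]
        refine ⟨?_, ?_, ?_, ?_⟩
        · simp only [List.length_append, List.length_cons, List.length_nil]
          push_cast
          omega
        · simp only [List.map_append, List.sum_append, List.map_cons, List.map_nil,
            List.sum_cons, List.sum_nil]
          omega
        · intro b
          simp only [PySem.Dict.getD_insert, hc, pvCtr_append, h3 b, h3 q.2]
          split_ifs with hq
          · subst hq; omega
          · omega
        · intro b
          simp only [PySem.Dict.getD_insert, hs, pvSumT_append, h4 b, h4 q.2]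
          split_ifs with hq
          · subst hq; omega
          · omega
      have := ih _ _ hstep
      simpa [pvUpdLoop, List.append_assoc] using this

theorem pvAnsLoop_eq (same : List (Int × Int)) (st) (p) (ans : Int) (h : pvMatch st p) :
    pvAnsLoop same st.2.2.1 st.2.2.2 st.1 st.2.1 ans = ans + (same.map (pvTerm p)).sum := by
  obtain ⟨h1, h2, h3, h4⟩ := h
  unfold pvAnsLoop
  rw [PySem.List.foldl_add]
  congr 1
  refine congrArg _ (List.map_congr_left (fun q _ => ?_))
  simp only [h1, h2, h3 q.2, h4 q.2, pvTerm]

theorem pvTerm_append_same (p : List (Int × Int)) (x y : Int × Int) (hxy : x.1 = y.1) :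
    pvTerm (p ++ [x]) y = pvTerm p y := by
  simp only [pvTerm, pvCtr_append, pvSumT_append, List.length_append, List.map_append,
    List.sum_append, List.map_cons, List.map_nil, List.sum_cons, List.sum_nil,
    List.length_cons, List.length_nil]
  push_cast
  split_ifs with hb
  · ring
  · rw [hxy]; ring

theorem pvSpecSweep_group (g r : List (Int × Int)) (c0 : Int) (hg : ∀ x ∈ g, x.1 = c0) :
    ∀ p, pvSpecSweep p (g ++ r) = (g.map (pvTerm p)).sum + pvSpecSweep (p ++ g) r := by
  induction g with
  | nil => intro p; simp
  | cons x g ih =>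
      intro p
      have hx1 : x.1 = c0 := hg x List.mem_cons_self
      have hg' : ∀ z ∈ g, z.1 = c0 := fun z hz => hg z (List.mem_cons_of_mem _ hz)
      simp only [List.cons_append, pvSpecSweep]
      rw [ih hg' (p ++ [x])]
      have hmap : g.map (pvTerm (p ++ [x])) = g.map (pvTerm p) :=
        List.map_congr_left (fun z hz =>
          pvTerm_append_same p x z (by rw [hx1, hg' z hz]))
      rw [hmap]
      simp only [List.map_cons, List.sum_cons, List.append_assoc, List.cons_append,
        List.nil_append]
      ring

theorem pvSweepA_eq_aux (n : Nat) : ∀ (r : List (Int × Int)), r.length ≤ n →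
    ∀ st p ans, pvMatch st p → pvSweepA r st ans = ans + pvSpecSweep p r := by
  induction n with
  | zero =>
      intro r hr st p ans h
      rw [List.length_eq_zero_iff.mp (Nat.le_zero.mp hr)]
      simp [pvSweepA, pvSpecSweep]
  | succ n ih =>
      intro r hr st p ans h
      match r with
      | [] => simp [pvSweepA, pvSpecSweep]
      | t :: rest =>
          rw [pvSweepA]
          have hsame : ∀ x ∈ t :: rest.takeWhile (fun p => p.1 == t.1), x.1 = t.1 := by
            intro x hx
            rcases List.mem_cons.mp hx with rfl | hx'
            · rfl
            · exact beq_iff_eq.mp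
                (List.mem_takeWhile_imp (p := fun z : Int × Int => z.1 == t.1) hx')
          have hlen : (rest.dropWhile (fun p => p.1 == t.1)).length ≤ n :=
            le_trans (List.length_dropWhile_le _ _) (by simpa using Nat.succ_le_succ_iff.mp hr)
          rw [ih _ hlen _ _ _ (pvUpdLoop_match _ _ _ h),
            pvAnsLoop_eq _ _ p _ h]
          have hr' : t :: rest
              = (t :: rest.takeWhile (fun p => p.1 == t.1))
                ++ rest.dropWhile (fun p => p.1 == t.1) := by
            simp [List.takeWhile_append_dropWhile]
          conv_rhs => rw [hr']
          rw [pvSpecSweep_group _ _ t.1 hsame p]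
          ring

theorem pvSweepA_eq (r : List (Int × Int)) : ∀ st p ans, pvMatch st p →
    pvSweepA r st ans = ans + pvSpecSweep p r :=
  pvSweepA_eq_aux r.length r le_rfl

def pvD (p : List (Int × Int)) (y : Int × Int) : Int :=
  ((p.filter (fun x => !(x.2 == y.2))).map (fun x => y.1 - x.1)).sum

theorem pvTerm_eq_pvD (y : Int × Int) : ∀ p, pvTerm p y = pvD p y := by
  intro p
  induction p with
  | nil => simp [pvTerm, pvCtr, pvSumT, pvD]
  | cons x p ih =>
      by_cases h : x.2 = y.2
      · have hb : (x.2 == y.2) = true := beq_iff_eq.mpr h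
        have hf1 : List.filter (fun z => z.2 == y.2) (x :: p)
            = x :: List.filter (fun z => z.2 == y.2) p := by simp [hb]
        have hf2 : List.filter (fun z => !(z.2 == y.2)) (x :: p)
            = List.filter (fun z => !(z.2 == y.2)) p := by simp [hb]
        simp only [pvTerm, pvCtr, pvSumT, pvD, hf1, hf2, List.map_cons, List.sum_cons,
          List.length_cons] at *
        push_cast at *
        linarith [ih]
      · have hb : (x.2 == y.2) = false := beq_eq_false_iff_ne.mpr h
        have hf1 : List.filter (fun z => z.2 == y.2) (x :: p)
            = List.filter (fun z => z.2 == y.2) p := by simp [hb]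
        have hf2 : List.filter (fun z => !(z.2 == y.2)) (x :: p)
            = x :: List.filter (fun z => !(z.2 == y.2)) p := by simp [hb]
        simp only [pvTerm, pvCtr, pvSumT, pvD, hf1, hf2, List.map_cons, List.sum_cons,
          List.length_cons] at *
        push_cast at *
        linarith [ih]

theorem pvD_append (p : List (Int × Int)) (y z : Int × Int) :
    pvD (p ++ [y]) z = pvD p z + pvGs y z := by
  by_cases h : y.2 = z.2
  · simp [pvD, pvGs, List.filter_append, h]
  · have hb : (y.2 == z.2) = false := beq_eq_false_iff_ne.mpr h
    simp [pvD, pvGs, List.filter_append, hb, h]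

theorem pvSpecSweep_eq (l : List (Int × Int)) : ∀ p,
    pvSpecSweep p l = (l.map (pvD p)).sum + pvPairFold pvGs l := by
  induction l with
  | nil => intro p; simp [pvSpecSweep, pvPairFold]
  | cons y l ih =>
      intro p
      simp only [pvSpecSweep, pvPairFold, List.map_cons, List.sum_cons]
      rw [ih (p ++ [y]), pvTerm_eq_pvD]
      have : l.map (pvD (p ++ [y])) = l.map (fun z => pvD p z + pvGs y z) :=
        List.map_congr_left (fun z _ => pvD_append p y z)
      rw [this, PySem.List.sum_map_add_int]
      ring

theorem pvSpecSweep_nil_eq (l : List (Int × Int)) :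
    pvSpecSweep [] l = pvPairFold pvGs l := by
  rw [pvSpecSweep_eq l []]
  have : l.map (pvD []) = l.map (fun _ => (0 : Int)) :=
    List.map_congr_left (fun z _ => rfl)
  rw [this]
  simp

theorem pvPairFold_gs_eq_pvSdiff (l : List (Int × Int))
    (h : l.Pairwise (fun a b => a.1 ≤ b.1)) : pvPairFold pvGs l = pvSdiff l := by
  induction l with
  | nil => rfl
  | cons x t ih =>
      rcases List.pairwise_cons.mp h with ⟨hx, ht⟩
      simp only [pvPairFold, pvSdiff]
      rw [ih ht]
      congr 1
      refine congrArg _ (List.map_congr_left (fun y hy => ?_))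
      by_cases hb : x.2 = y.2
      · simp [pvGs, hb]
      · have : |x.1 - y.1| = y.1 - x.1 := by
          rw [abs_sub_comm]; exact abs_of_nonneg (by linarith [hx y hy])
        simp [pvGs, hb, this]

theorem pvA_eq_pvSdiff (N : Int) (B C : List Int) :
    forest_diff_no_get N B C =
      pvSdiff ((PySem.List.pyRange 0 N 1).map
        (fun i => (PySem.List.pyGetD C i 0, PySem.List.pyGetD B i 0))) := by
  have h0 : pvMatch (PySem.Dict.empty, PySem.Dict.empty, (0 : Int), (0 : Int)) [] := by
    refine ⟨rfl, rfl, ?_, ?_⟩ <;> intro b <;>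
      simp [PySem.Dict.getD_empty, pvCtr, pvSumT]
  have hsym : ∀ x y : Int × Int,
      (if x.2 = y.2 then 0 else |x.1 - y.1|) = (if y.2 = x.2 then 0 else |y.1 - x.1|) := by
    intro x y
    by_cases h : x.2 = y.2
    · simp [h]
    · have h' : ¬ y.2 = x.2 := fun he => h he.symm
      rw [if_neg h, if_neg h', abs_sub_comm]
  simp only [forest_diff_no_get]
  rw [pvSweepA_eq _ _ [] 0 h0, zero_add, pvSpecSweep_nil_eq,
    pvPairFold_gs_eq_pvSdiff _ (PySem.List.sorted_pairwise _ _)]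
  exact pvPairFold_perm _ hsym (PySem.List.sorted_perm _ _ _)

-- ---- B-side ----
theorem pvFoldlSub (l : List (List Int)) (f : List Int → Int) (a : Int) :
    l.foldl (fun t hs => t - f hs) a = a - (l.map f).sum := by
  induction l generalizing a with
  | nil => simp
  | cons hs l ih => simp only [List.foldl_cons, List.map_cons, List.sum_cons, ih]; ring

theorem pvB_core (idx : List Int) (tB tC : Int → Int) :
    (idx.foldl (fun d i => d.modify (tB i) [] (fun l => l ++ [tC i]))
        PySem.Dict.empty).values.foldl
      (fun t hs => t - pvPairSum (PySem.List.sorted hs (fun h => h) false))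
      (pvPairSum (PySem.List.sorted (idx.map (fun i => tC i)) (fun h => h) false))
    = pvSdiff (idx.map (fun i => (tC i, tB i))) := by
  have hsortAll : ∀ hs : List Int,
      pvPairSum (PySem.List.sorted hs (fun h => h) false) = pvSall hs := by
    intro hs
    rw [pvPairSum_eq_pvSall _ (by simpa using PySem.List.sorted_pairwise hs (fun h => h))]
    exact pvPairFold_perm _ (fun x y => abs_sub_comm x y)
      (PySem.List.sorted_perm hs _ false)
  have hfoldM : idx.foldl (fun d i => d.modify (tB i) [] (fun l => l ++ [tC i]))
        PySem.Dict.empty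
      = (idx.map (fun i => (tB i, tC i))).foldl
          (fun d p => d.modify p.1 [] (fun l => l ++ [p.2])) PySem.Dict.empty := by
    rw [List.foldl_map]
  have hkeys : ((idx.map (fun i => (tB i, tC i))).foldl
        (fun d p => d.modify p.1 [] (fun l => l ++ [p.2])) PySem.Dict.empty).keys
      = PySem.Set.ofList ((idx.map (fun i => (tB i, tC i))).map (·.1)) := by
    have := PySem.Dict.keys_foldl_modify_key (idx.map (fun i => (tB i, tC i)))
      Prod.fst ([] : List Int) (fun _ p => fun l => l ++ [p.2]) PySem.Dict.empty
    simpa [PySem.Dict.keys_empty, PySem.Set.update_nil_left] using this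
  have hnd : (PySem.Set.ofList ((idx.map (fun i => (tB i, tC i))).map (·.1))).Nodup :=
    PySem.Set.nodup_ofList _
  have hgetD : ∀ b, ((idx.map (fun i => (tB i, tC i))).foldl
        (fun d p => d.modify p.1 [] (fun l => l ++ [p.2])) PySem.Dict.empty).getD b []
      = ((idx.map (fun i => (tB i, tC i))).filter (fun p => p.1 == b)).map (·.2) := by
    intro b
    simpa [PySem.Dict.getD_empty] using
      PySem.Dict.getD_foldl_modify_append (idx.map (fun i => (tB i, tC i)))
        PySem.Dict.empty b
  have hvalues : ((idx.map (fun i => (tB i, tC i))).foldl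
        (fun d p => d.modify p.1 [] (fun l => l ++ [p.2])) PySem.Dict.empty).values
      = (PySem.Set.ofList ((idx.map (fun i => (tB i, tC i))).map (·.1))).map
          (fun b => ((idx.map (fun i => (tB i, tC i))).filter (fun p => p.1 == b)).map (·.2)) := by
    rw [PySem.Dict.values_eq_map_keys _ (by rw [hkeys]; exact hnd) ([] : List Int), hkeys]
    exact List.map_congr_left (fun b _ => hgetD b)
  have hbridge : ∀ b, ((idx.map (fun i => (tB i, tC i))).filter (fun p => p.1 == b)).map (·.2)
      = ((idx.map (fun i => (tC i, tB i))).filter (fun p => p.2 == b)).map (·.1) := by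
    intro b
    simp [List.filter_map, List.map_map, Function.comp_def]
  have hkeyL : (idx.map (fun i => (tB i, tC i))).map (·.1) = idx.map tB := by
    simp [List.map_map, Function.comp_def]
  have hcov : ∀ p ∈ idx.map (fun i => (tC i, tB i)),
      p.2 ∈ PySem.Set.ofList ((idx.map (fun i => (tB i, tC i))).map (·.1)) := by
    intro p hp
    rcases List.mem_map.mp hp with ⟨i, hi, rfl⟩
    refine (PySem.Set.mem_ofList _ _).mpr ?_
    rw [hkeyL]
    exact List.mem_map.mpr ⟨i, hi, rfl⟩
  have hpart := pvSsame_partition (idx.map (fun i => (tC i, tB i)))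
    (PySem.Set.ofList ((idx.map (fun i => (tB i, tC i))).map (·.1))) hnd hcov
  have hsplit := pvSall_split (idx.map (fun i => (tC i, tB i)))
  have hall : (idx.map (fun i => (tC i, tB i))).map (·.1) = idx.map (fun i => tC i) := by
    simp [List.map_map, Function.comp_def]
  rw [hfoldM, hvalues, pvFoldlSub, List.map_map, hsortAll]
  have hmapK : ((PySem.Set.ofList ((idx.map (fun i => (tB i, tC i))).map (·.1))).map
        ((fun hs => pvPairSum (PySem.List.sorted hs (fun h => h) false)) ∘
          (fun b => ((idx.map (fun i => (tB i, tC i))).filter (fun p => p.1 == b)).map (·.2))))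
      = (PySem.Set.ofList ((idx.map (fun i => (tB i, tC i))).map (·.1))).map
          (fun b => pvSall (((idx.map (fun i => (tC i, tB i))).filter
            (fun p => p.2 == b)).map (·.1))) := by
    refine List.map_congr_left (fun b _ => ?_)
    simp only [Function.comp_def]
    rw [hsortAll, hbridge b]
  rw [hmapK, ← hpart]
  rw [hall] at hsplit
  omega

theorem pvB_eq_pvSdiff (N : Int) (B C : List Int) :
    forest_diff_no_get_alt N B C =
      pvSdiff ((PySem.List.pyRange 0 N 1).map
        (fun i => (PySem.List.pyGetD C i 0, PySem.List.pyGetD B i 0))) := by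
  exact pvB_core (PySem.List.pyRange 0 N 1)
    (fun i => PySem.List.pyGetD B i 0) (fun i => PySem.List.pyGetD C i 0)

-- ===== VERDICT (by name: the statement is the Claim_ definition above) =====
theorem forest_diff_no_get_spec : Claim_equal_forest_diff_no_get := by
  intro N B C _ _
  unfold Spec_forest_diff_no_get
  rw [pvA_eq_pvSdiff, pvB_eq_pvSdiff]
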